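-- pv_equiv track=rewrite | github.com/lei8c8/leetcode_data_structure | 2_hashing/hashing/2068_check_whether_two_strings_are_almost_equal.py | checkAlmostEquivalent
-- ===== SOURCE A (Python) =====
-- from collections import Counter
--
-- def checkAlmostEquivalent(word1: str, word2: str) -> bool:
--     ct1, ct2 = Counter(word1), Counter(word2)
--
--     for key in ct1:
--         if abs(ct1[key] - ct2[key]) > 3:
--             return False
--
--     for key in ct2:
--         if abs(ct1[key] - ct2[key]) > 3:
--             return False
--
--     return True
-- ===== SOURCE B (Python) =====
-- def checkAlmostEquivalent(word1: str, word2: str) -> bool: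
--     # Fixed-alphabet scan: no frequency table at all. For each ASCII code,
--     # count its occurrences in each word directly and compare.
--     for i in range(128):
--         c = chr(i)
--         diff = sum(ch == c for ch in word1) - sum(ch == c for ch in word2)
--         if diff > 3 or diff < -3:
--             return False
--     return True
-- ===== Notes on version B (the rewrite author's own statement) =====
-- stated objective: alternative
-- what changed: B drops the frequency tables entirely: it scans the fixed 128-code ASCII alphabet, counting each character's occurrences in each word on the spot and early-returning on a gap > 3, instead of A's two Counter hash maps each iterated against the other.
import Mathlib
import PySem

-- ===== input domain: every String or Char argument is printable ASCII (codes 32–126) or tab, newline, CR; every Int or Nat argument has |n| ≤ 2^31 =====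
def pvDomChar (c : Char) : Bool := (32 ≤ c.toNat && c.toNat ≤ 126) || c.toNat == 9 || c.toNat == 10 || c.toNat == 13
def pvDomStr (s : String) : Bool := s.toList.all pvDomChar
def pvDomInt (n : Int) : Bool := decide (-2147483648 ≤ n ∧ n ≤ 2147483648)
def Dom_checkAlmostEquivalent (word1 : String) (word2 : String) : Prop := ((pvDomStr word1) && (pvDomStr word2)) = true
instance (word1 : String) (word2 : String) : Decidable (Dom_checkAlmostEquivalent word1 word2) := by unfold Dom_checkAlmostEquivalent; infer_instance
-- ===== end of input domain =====

-- B replaces A's two Counter hash maps with a table-free scan of the fixed 128-code ASCII alphabet; objective: alternative.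

-- ===== PORT A =====
-- the early-return 'for key in ct: if abs(...) > 3: return False' loop
def pvLoopA (ks : List Char) (ct1 ct2 : PySem.Dict Char Int) : Bool :=
  match ks with
  | [] => true
  | k :: rest =>
      if 3 < (ct1.getD k 0 - ct2.getD k 0).natAbs then false
      else pvLoopA rest ct1 ct2

def checkAlmostEquivalent (word1 : String) (word2 : String) : Bool :=
  let ct1 := PySem.Dict.counter word1.toList
  let ct2 := PySem.Dict.counter word2.toList
  if pvLoopA ct1.keys ct1 ct2 = false then false
  else pvLoopA ct2.keys ct1 ct2

-- ===== PORT B =====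
-- 'for i in range(128): …' with early return; 'sum(ch == c for ch in w)' is List.count
def pvLoopB (is_ : List Int) (w1 w2 : List Char) : Bool :=
  match is_ with
  | [] => true
  | i :: rest =>
      let c := Char.ofNat i.toNat
      let diff : Int := (w1.count c : Int) - (w2.count c : Int)
      if 3 < diff ∨ diff < -3 then false
      else pvLoopB rest w1 w2

def checkAlmostEquivalent_alt (word1 : String) (word2 : String) : Bool :=
  pvLoopB (PySem.List.pyRange 0 128 1) word1.toList word2.toList

-- ===== PRECONDITION & SPEC =====
def Spec_checkAlmostEquivalent (word1 : String) (word2 : String) (out : Bool) : Prop := out = checkAlmostEquivalent_alt word1 word2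
instance (word1 : String) (word2 : String) (out : Bool) : Decidable (Spec_checkAlmostEquivalent word1 word2 out) := by unfold Spec_checkAlmostEquivalent; infer_instance

-- ===== CLAIM (what is proved, stated in full; the proofs are below) =====
def Claim_equal_checkAlmostEquivalent : Prop := ∀ (word1 : String) (word2 : String), Dom_checkAlmostEquivalent word1 word2 → Spec_checkAlmostEquivalent word1 word2 (checkAlmostEquivalent word1 word2)

-- ===== LEMMAS AND PROOFS =====

theorem pvLoopA_eq_all (ks : List Char) (ct1 ct2 : PySem.Dict Char Int) :
    pvLoopA ks ct1 ct2 = ks.all (fun k => decide ((ct1.getD k 0 - ct2.getD k 0).natAbs ≤ 3)) := by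
  induction ks with
  | nil => rfl
  | cons k rest ih =>
      simp only [pvLoopA, List.all_cons, ih]
      by_cases h : 3 < (ct1.getD k 0 - ct2.getD k 0).natAbs
      · simp [h, Nat.not_le.mpr h]
      · simp [h, Nat.not_lt.mp h]

theorem pvLoopB_eq_all (is_ : List Int) (w1 w2 : List Char) :
    pvLoopB is_ w1 w2 = is_.all (fun i =>
      decide (((w1.count (Char.ofNat i.toNat) : Int) - (w2.count (Char.ofNat i.toNat) : Int)).natAbs ≤ 3)) := by
  induction is_ with
  | nil => rfl
  | cons i rest ih =>
      simp only [pvLoopB, List.all_cons, ih]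
      by_cases h : 3 < (w1.count (Char.ofNat i.toNat) : Int) - (w2.count (Char.ofNat i.toNat) : Int)
        ∨ (w1.count (Char.ofNat i.toNat) : Int) - (w2.count (Char.ofNat i.toNat) : Int) < -3
      · have : ¬ ((w1.count (Char.ofNat i.toNat) : Int) - (w2.count (Char.ofNat i.toNat) : Int)).natAbs ≤ 3 := by
          omega
        simp [h, this]
      · have : ((w1.count (Char.ofNat i.toNat) : Int) - (w2.count (Char.ofNat i.toNat) : Int)).natAbs ≤ 3 := by
          omega
        simp [h, this]

theorem checkAlmostEquivalent_eq (word1 word2 : String)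
    (hdom : Dom_checkAlmostEquivalent word1 word2) :
    checkAlmostEquivalent word1 word2 = checkAlmostEquivalent_alt word1 word2 := by
  unfold checkAlmostEquivalent checkAlmostEquivalent_alt
  simp only [pvLoopA_eq_all, pvLoopB_eq_all, PySem.Dict.keys_counter, PySem.Dict.getD_counter]
  set w1 := word1.toList
  set w2 := word2.toList
  have hif : (if ((PySem.Set.ofList w1).all
        (fun k => decide (((w1.count k : Int) - w2.count k).natAbs ≤ 3))) = false then false
      else (PySem.Set.ofList w2).all
        (fun k => decide (((w1.count k : Int) - w2.count k).natAbs ≤ 3)))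
      = ((PySem.Set.ofList w1).all
          (fun k => decide (((w1.count k : Int) - w2.count k).natAbs ≤ 3)) &&
        (PySem.Set.ofList w2).all
          (fun k => decide (((w1.count k : Int) - w2.count k).natAbs ≤ 3))) := by
    cases h : (PySem.Set.ofList w1).all
        (fun k => decide (((w1.count k : Int) - w2.count k).natAbs ≤ 3)) <;> simp
  rw [hif, Bool.eq_iff_iff]
  have hsmall : ∀ c : Char, c ∈ w1 ∨ c ∈ w2 → c.toNat < 128 := by
    intro c hc
    have h1 : pvDomStr word1 = true ∧ pvDomStr word2 = true := by
      unfold Dom_checkAlmostEquivalent at hdom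
      simpa using hdom
    have ha1 : ∀ x ∈ w1, pvDomChar x = true := by
      simpa [pvDomStr, List.all_eq_true] using h1.1
    have ha2 : ∀ x ∈ w2, pvDomChar x = true := by
      simpa [pvDomStr, List.all_eq_true] using h1.2
    have : pvDomChar c = true := by
      rcases hc with hc | hc
      · exact ha1 c hc
      · exact ha2 c hc
    simp only [pvDomChar, Bool.or_eq_true, Bool.and_eq_true, decide_eq_true_eq, beq_iff_eq] at this
    omega
  simp only [Bool.and_eq_true, List.all_eq_true, PySem.Set.mem_ofList, decide_eq_true_eq]
  constructor
  · rintro ⟨ha, hb⟩ i hi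
    have hi' : (0:Int) ≤ i ∧ i < 128 := by
      have := (PySem.List.mem_pyRange_iff_of_pos (a := 0) (b := 128) (s := 1)
        (by norm_num) i).mp hi
      exact ⟨this.1, this.2.1⟩
    set c := Char.ofNat i.toNat with hc
    by_cases h1 : c ∈ w1
    · exact ha c h1
    · by_cases h2 : c ∈ w2
      · exact hb c h2
      · have e1 : w1.count c = 0 := List.count_eq_zero.mpr h1
        have e2 : w2.count c = 0 := List.count_eq_zero.mpr h2
        simp [e1, e2]
  · intro h
    have key : ∀ c : Char, c ∈ w1 ∨ c ∈ w2 →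
        ((w1.count c : Int) - w2.count c).natAbs ≤ 3 := by
      intro c hc
      have hlt := hsmall c hc
      have hmem : (c.toNat : Int) ∈ PySem.List.pyRange 0 128 1 := by
        refine (PySem.List.mem_pyRange_iff_of_pos (by norm_num) _).mpr ?_
        refine ⟨?_, ?_, one_dvd _⟩
        · positivity
        · exact_mod_cast hlt
      have := h _ hmem
      simpa [Char.ofNat_toNat] using this
    exact ⟨fun k hk => key k (Or.inl hk), fun k hk => key k (Or.inr hk)⟩

-- ===== VERDICT (by name: the statement is the Claim_ definition above) =====
theorem checkAlmostEquivalent_spec : Claim_equal_checkAlmostEquivalent := by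
  intro word1 word2 hdom
  exact checkAlmostEquivalent_eq word1 word2 hdom
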